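-- pv_equiv track=rewrite | github.com/Sii-liuzhihong/AHAT | src/ahat/evaluation/solvability.py | extend_goal_list
-- ===== SOURCE A (Python) =====
-- from typing import Any, Dict, List, Set, Tuple
--
-- def extend_goal_list(goal_list: List[Any]) -> List[List[Any]]:
--     """
--     Build all prefix sub-lists of *goal_list*.
--
--     Example::
--
--         extend_goal_list(["A", "B", "C"])
--         -> [["A"], ["A", "B"], ["A", "B", "C"]]
--
--     An empty input returns ``[[]]``.
--     """
--     if not goal_list:
--         return [[]]
--     extended = [[] for _ in range(len(goal_list))]
--     for i, goal in enumerate(goal_list):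
--         for j in range(i, len(goal_list)):
--             extended[j].append(goal)
--     return extended
-- ===== SOURCE B (Python) =====
-- from typing import Any, List
--
-- def extend_goal_list(goal_list: List[Any]) -> List[List[Any]]:
--     if not goal_list:
--         return [[]]
--     return [goal_list[:i + 1] for i in range(len(goal_list))]
-- ===== Notes on version B (the rewrite author's own statement) =====
-- stated objective: simpler
-- what changed: Replaces A's transposed nested loops (pre-allocated n lists, each element appended into all later prefixes) with a single pass that slices each prefix goal_list[:i+1] directly.
import Mathlib
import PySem

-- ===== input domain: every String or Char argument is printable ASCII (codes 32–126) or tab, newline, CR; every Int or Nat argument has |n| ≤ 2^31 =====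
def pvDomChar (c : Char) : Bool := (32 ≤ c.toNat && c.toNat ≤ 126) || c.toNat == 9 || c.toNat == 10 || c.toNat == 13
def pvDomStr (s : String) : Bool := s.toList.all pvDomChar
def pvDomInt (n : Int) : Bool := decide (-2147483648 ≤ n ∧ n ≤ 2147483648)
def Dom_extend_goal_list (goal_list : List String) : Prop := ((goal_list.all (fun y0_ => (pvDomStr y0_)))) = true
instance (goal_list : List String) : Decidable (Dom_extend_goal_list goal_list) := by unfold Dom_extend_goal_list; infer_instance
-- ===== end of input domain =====

-- B replaces A's transposed nested loops (pre-allocate n lists, append each element into all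
-- later prefixes) with a single pass that slices each prefix goal_list[:i+1] directly (simpler).


-- ===== PORT A =====
-- enumerate(goal_list) / range(i, n): Python's indices here are always 0 ≤ i < n, so the
-- Nat-indexed zipIdx and List.range' i (n - i) are exact renderings.
def extend_goal_list (goal_list : List String) : List (List String) :=
  if goal_list = [] then [[]]
  else
    let n := goal_list.length
    goal_list.zipIdx.foldl
      (fun ext p =>
        (List.range' p.2 (n - p.2)).foldl (fun e j => e.modify j (· ++ [p.1])) ext)
      (List.replicate n ([] : List String))

-- ===== PORT B =====
def extend_goal_list_alt (goal_list : List String) : List (List String) :=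
  if goal_list = [] then [[]]
  else (List.range goal_list.length).map
    (fun (i : Nat) => PySem.List.slice goal_list none (some ((i : Int) + 1)))

-- ===== PRECONDITION & SPEC =====
def Spec_extend_goal_list (goal_list : List String) (out : List (List String)) : Prop := out = extend_goal_list_alt goal_list
instance (goal_list : List String) (out : List (List String)) : Decidable (Spec_extend_goal_list goal_list out) := by unfold Spec_extend_goal_list; infer_instance

-- ===== CLAIM (what is proved, stated in full; the proofs are below) =====
def Claim_equal_extend_goal_list : Prop := ∀ (goal_list : List String), Dom_extend_goal_list goal_list → Spec_extend_goal_list goal_list (extend_goal_list goal_list)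

-- ===== LEMMAS AND PROOFS =====

lemma getElem?_fold_modify (f : List String → List String) (a m j : Nat)
    (ℓ : List (List String)) :
    ((List.range' a m).foldl (fun e i => e.modify i f) ℓ)[j]? =
      if a ≤ j ∧ j < a + m then ℓ[j]?.map f else ℓ[j]? := by
  induction m generalizing a ℓ with
  | zero => simp
  | succ m ih =>
    rw [List.range'_succ, List.foldl_cons, ih, List.getElem?_modify]
    by_cases hja : j = a
    · subst hja
      rw [if_neg (by omega), if_pos (by omega)]
      cases ℓ[j]? <;> simp
    · by_cases h1 : a + 1 ≤ j ∧ j < a + 1 + m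
      · rw [if_pos h1, if_pos (by omega)]
        cases ℓ[j]? <;> simp [Ne.symm hja]
      · rw [if_neg h1, if_neg (by omega)]
        cases ℓ[j]? <;> simp [Ne.symm hja]

-- invariant of A's double loop: after the first k enumerated elements, slot j holds
-- the prefix of length min (j+1) k
lemma outer_invariant (gl : List String) (k : Nat) (hk : k ≤ gl.length) :
    ((gl.take k).zipIdx).foldl
        (fun ext p =>
          (List.range' p.2 (gl.length - p.2)).foldl
            (fun e j => e.modify j (· ++ [p.1])) ext)
        (List.replicate gl.length ([] : List String))
      = (List.range gl.length).map (fun j => gl.take (min (j + 1) k)) := by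
  induction k with
  | zero =>
    apply List.ext_getElem <;> simp
  | succ k ih =>
    have hk' : k < gl.length := by omega
    rw [List.take_succ_eq_append_getElem hk', List.zipIdx_append, List.foldl_append]
    rw [ih (by omega)]
    simp only [List.length_take, Nat.min_eq_left (Nat.le_of_lt hk'), List.zipIdx_cons,
      List.zipIdx_nil, Nat.zero_add, List.foldl_cons, List.foldl_nil]
    apply List.ext_getElem?
    intro j
    rw [getElem?_fold_modify]
    by_cases hj : j < gl.length
    · by_cases hjk : k ≤ j
      · rw [if_pos ⟨hjk, by omega⟩]
        simp only [List.getElem?_map, List.getElem?_range hj, Option.map_some]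
        congr 1
        rw [Nat.min_eq_right (by omega), Nat.min_eq_right (by omega),
          List.take_succ_eq_append_getElem hk']
      · rw [if_neg (by omega)]
        simp only [List.getElem?_map, List.getElem?_range hj, Option.map_some]
        congr 2
        omega
    · rw [if_neg (by omega),
        List.getElem?_eq_none (by simpa using Nat.le_of_not_lt hj),
        List.getElem?_eq_none (by simpa using Nat.le_of_not_lt hj)]

-- ===== VERDICT (by name: the statement is the Claim_ definition above) =====
theorem extend_goal_list_spec : Claim_equal_extend_goal_list := by
  intro gl _
  unfold Spec_extend_goal_list extend_goal_list extend_goal_list_alt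
  by_cases h : gl = []
  · simp [h]
  · rw [if_neg h, if_neg h]
    have := outer_invariant gl gl.length (le_refl _)
    rw [List.take_length] at this
    rw [this]
    apply List.map_congr_left
    intro j hj
    rw [List.mem_range] at hj
    have : ((j : Int) + 1) = ((j + 1 : Nat) : Int) := by push_cast; ring
    rw [this, PySem.List.slice_to_natCast, Nat.min_eq_left (by omega)]
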